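-- pv_equiv track=rewrite | github.com/Herb-AI/HerbConstraintTranslator.jl | src/pyprogtree/pyprogtree/grammar.py | count_and_indexing
-- ===== SOURCE A (Python) =====
-- def count_and_indexing(sequence):
--     count = {}
--     indexing = []
--
--     # Prepare indexing of each rule and total count of rules
--     for e in sequence:
--         if e in count:
--             indexing.append(count[e])
--             count[e] += 1
--         else:
--             count[e] = 1
--             indexing.append(0)
--
--     return count, indexing
-- ===== SOURCE B (Python) =====
-- def count_and_indexing(sequence):
--     count = {x: sequence.count(x) for x in sequence}
--     indexing = [sequence[:i].count(x) for i, x in enumerate(sequence)]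
--     return count, indexing
-- ===== Notes on version B (the rewrite author's own statement) =====
-- stated objective: idiomatic
-- what changed: Replaces the single stateful pass maintaining a running-count dict with two declarative comprehensions built by repeated scanning: count is a dict comprehension {x: sequence.count(x) for x in sequence} and indexing[i] is the prefix-slice scan sequence[:i].count(sequence[i]).
import Mathlib
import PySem

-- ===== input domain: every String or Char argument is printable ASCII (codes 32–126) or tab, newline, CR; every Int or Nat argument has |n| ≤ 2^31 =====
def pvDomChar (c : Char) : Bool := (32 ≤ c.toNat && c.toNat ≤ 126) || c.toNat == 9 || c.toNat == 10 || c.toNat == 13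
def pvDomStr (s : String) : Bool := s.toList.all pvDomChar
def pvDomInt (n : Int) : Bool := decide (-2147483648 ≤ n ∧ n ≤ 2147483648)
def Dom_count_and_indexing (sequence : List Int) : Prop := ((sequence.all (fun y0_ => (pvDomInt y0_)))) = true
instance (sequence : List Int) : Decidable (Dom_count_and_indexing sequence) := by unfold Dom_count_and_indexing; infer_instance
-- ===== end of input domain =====

-- B replaces A's single stateful pass (running-count dict) with two declarative
-- comprehensions that rescan the sequence (dict comprehension of total counts,
-- prefix-slice counts for the indexing); idiomatic/brevity, not faster.


-- ===== PORT A =====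
-- one pass; state = (count dict, indexing list), returned as (items, indexing)
def count_and_indexing (sequence : List Int) : (List (Int × Int)) × List Int :=
  let st := sequence.foldl
    (fun (s : PySem.Dict Int Int × List Int) e =>
      if s.1.contains e then
        (s.1.insert e (s.1.getD e 0 + 1), s.2 ++ [s.1.getD e 0])
      else
        (s.1.insert e 1, s.2 ++ [0]))
    (PySem.Dict.empty, [])
  (st.1.items, st.2)

-- ===== PORT B =====
-- dict comprehension {x: sequence.count(x) for x in sequence}
-- and [sequence[:i].count(x) for i, x in enumerate(sequence)]
def count_and_indexing_alt (sequence : List Int) : (List (Int × Int)) × List Int :=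
  let count := sequence.foldl
    (fun (d : PySem.Dict Int Int) x => d.insert x (PySem.List.count sequence x : Int))
    PySem.Dict.empty
  let indexing := (PySem.List.enumerate sequence).map
    (fun p => (PySem.List.count (PySem.List.slice sequence none (some p.1)) p.2 : Int))
  (count.items, indexing)

-- ===== PRECONDITION & SPEC =====
def Spec_count_and_indexing (sequence : List Int) (out : (List (Int × Int)) × List Int) : Prop := out = count_and_indexing_alt sequence
instance (sequence : List Int) (out : (List (Int × Int)) × List Int) : Decidable (Spec_count_and_indexing sequence out) := by unfold Spec_count_and_indexing; infer_instance

-- ===== CLAIM (what is proved, stated in full; the proofs are below) =====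
def Claim_equal_count_and_indexing : Prop := ∀ (sequence : List Int), Dom_count_and_indexing sequence → Spec_count_and_indexing sequence (count_and_indexing sequence)

-- ===== LEMMAS AND PROOFS =====

-- canonical count dict after processing p: first occurrences paired with their counts in p
def pvD (p : List Int) : PySem.Dict Int Int :=
  PySem.Dict.mk ((PySem.Set.ofList p).map (fun x => (x, (PySem.List.count p x : Int))))

-- B's indexing expression over l (prefix-slice counts)
def pvJ (l : List Int) : List Int :=
  (PySem.List.enumerate l).map
    (fun p => (PySem.List.count (PySem.List.slice l none (some p.1)) p.2 : Int))

theorem pvOfList_append (l : List Int) (x : Int) :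
    PySem.Set.ofList (l ++ [x]) = PySem.Set.add (PySem.Set.ofList l) x := by
  rw [PySem.Set.ofList_eq_foldl, PySem.Set.ofList_eq_foldl, List.foldl_append]
  rfl

theorem pvOfList_append_mem {p : List Int} {x : Int} (h : x ∈ p) :
    PySem.Set.ofList (p ++ [x]) = PySem.Set.ofList p := by
  rw [pvOfList_append, PySem.Set.add]
  have hc : (PySem.Set.ofList p).contains x = true :=
    (PySem.Set.contains_iff (PySem.Set.ofList p) x).mpr ((PySem.Set.mem_ofList p x).mpr h)
  simp [h]

theorem pvOfList_append_not_mem {p : List Int} {x : Int} (h : x ∉ p) :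
    PySem.Set.ofList (p ++ [x]) = PySem.Set.ofList p ++ [x] := by
  rw [pvOfList_append, PySem.Set.add]
  have hc : (PySem.Set.ofList p).contains x = false := by
    by_contra hcc
    exact h ((PySem.Set.mem_ofList p x).mp
      ((PySem.Set.contains_iff (PySem.Set.ofList p) x).mp (by simpa using hcc)))
  simp [h]

theorem pvD_contains (p : List Int) (x : Int) :
    (pvD p).contains x = decide (x ∈ p) := by
  rw [PySem.Dict.contains_eq_decide_mem_keys]
  simp [pvD, PySem.Dict.keys_mk, List.map_map, Function.comp_def, PySem.Set.mem_ofList]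

theorem pvD_keys_nodup (p : List Int) : (pvD p).keys.Nodup := by
  have : (pvD p).keys = PySem.Set.ofList p := by
    simp [pvD, PySem.Dict.keys_mk, List.map_map, Function.comp_def]
  rw [this, ← PySem.List.dedup_eq_ofList]
  exact PySem.List.nodup_dedup p

theorem pvD_getD {p : List Int} {x : Int} (h : x ∈ p) :
    (pvD p).getD x 0 = (PySem.List.count p x : Int) := by
  refine PySem.Dict.getD_of_mem_items _ ?_ (pvD_keys_nodup p) 0
  simp only [pvD]
  exact List.mem_map.mpr ⟨x, (PySem.Set.mem_ofList p x).mpr h, rfl⟩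

theorem pvD_step (p : List Int) (x : Int) :
    (if (pvD p).contains x then
        ((pvD p).insert x ((pvD p).getD x 0 + 1), pvJ p ++ [(pvD p).getD x 0])
      else
        ((pvD p).insert x 1, pvJ p ++ [0]))
      = (pvD (p ++ [x]), pvJ p ++ [(PySem.List.count p x : Int)]) := by
  by_cases h : x ∈ p
  · have hc : (pvD p).contains x = true := by rw [pvD_contains]; simpa using h
    simp only [hc, if_true, pvD_getD h]
    refine Prod.ext ?_ rfl
    apply PySem.Dict.ext_iff.mpr
    show ((pvD p).insert x _).items = _
    rw [PySem.Dict.items_insert_of_contains _ _ hc]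
    simp only [pvD, pvOfList_append_mem h, List.map_map]
    apply List.map_congr_left
    intro y hy
    by_cases hyx : y = x
    · subst hyx
      simp [PySem.List.count_eq, List.count_append]
    · simp [hyx, Ne.symm hyx, PySem.List.count_eq, List.count_append]
  · have hc : (pvD p).contains x = false := by rw [pvD_contains]; simpa using h
    have hcnt : PySem.List.count p x = 0 := by
      simp [PySem.List.count_eq, List.count_eq_zero]; exact h
    simp only [hc, Bool.false_eq_true, if_false, hcnt, Nat.cast_zero]
    refine Prod.ext ?_ rfl
    apply PySem.Dict.ext_iff.mpr
    show ((pvD p).insert x _).items = _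
    rw [PySem.Dict.items_insert_of_not_contains _ _ hc]
    simp only [pvD, pvOfList_append_not_mem h, List.map_append,
      List.map_cons, List.map_nil]
    congr 1
    · apply List.map_congr_left
      intro y hy
      have hyp : y ∈ p := (PySem.Set.mem_ofList p y).mp hy
      have hyx : y ≠ x := fun e => h (e ▸ hyp)
      simp [PySem.List.count_eq, List.count_append, Ne.symm hyx]
    · simp [PySem.List.count_eq, List.count_append]
      simp [PySem.List.count_eq] at hcnt
      omega

theorem pvJ_append (p : List Int) (x : Int) :
    pvJ (p ++ [x]) = pvJ p ++ [(PySem.List.count p x : Int)] := by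
  unfold pvJ
  rw [PySem.List.enumerate_append, List.map_append]
  congr 1
  · apply List.map_congr_left
    intro q hq
    rcases (PySem.List.mem_enumerate_iff _ _ _).mp hq with ⟨k, hk, rfl⟩
    simp only [zero_add]
    rw [PySem.List.slice_to_natCast, PySem.List.slice_to_natCast,
      List.take_append_of_le_length (le_of_lt hk)]
  · simp [PySem.List.enumerate_cons, PySem.List.slice_to_natCast]

theorem pvLoopA (rest p : List Int) :
    rest.foldl
      (fun (s : PySem.Dict Int Int × List Int) e =>
        if s.1.contains e then
          (s.1.insert e (s.1.getD e 0 + 1), s.2 ++ [s.1.getD e 0])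
        else
          (s.1.insert e 1, s.2 ++ [0]))
      (pvD p, pvJ p)
    = (pvD (p ++ rest), pvJ (p ++ rest)) := by
  induction rest generalizing p with
  | nil => simp
  | cons x rest ih =>
    rw [List.foldl_cons]
    have hstep := pvD_step p x
    simp only at hstep
    rw [hstep, ← pvJ_append, ih (p ++ [x])]
    simp

theorem pvDictB (c : Int → Int) (l : List Int) :
    l.foldl (fun (d : PySem.Dict Int Int) x => d.insert x (c x)) PySem.Dict.empty
      = PySem.Dict.mk ((PySem.Set.ofList l).map (fun x => (x, c x))) := by
  induction l using List.reverseRecOn with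
  | nil => simp [PySem.Set.ofList, PySem.Set.empty, PySem.Dict.empty]
  | append_singleton l x ih =>
    rw [List.foldl_append, List.foldl_cons, List.foldl_nil, ih]
    by_cases h : x ∈ l
    · have hc : (PySem.Dict.mk ((PySem.Set.ofList l).map (fun x => (x, c x)))).contains x = true := by
        rw [PySem.Dict.contains_eq_decide_mem_keys]
        simp [PySem.Dict.keys_mk, List.map_map, Function.comp_def, PySem.Set.mem_ofList, h]
      apply PySem.Dict.ext_iff.mpr
      show (PySem.Dict.insert _ x _).items = _
      rw [PySem.Dict.items_insert_of_contains _ _ hc]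
      simp only [pvOfList_append_mem h, List.map_map]
      apply List.map_congr_left
      intro y hy
      by_cases hyx : y = x
      · subst hyx; simp
      · simp [hyx]
    · have hc : (PySem.Dict.mk ((PySem.Set.ofList l).map (fun x => (x, c x)))).contains x = false := by
        rw [PySem.Dict.contains_eq_decide_mem_keys]
        simp [PySem.Dict.keys_mk, List.map_map, Function.comp_def, PySem.Set.mem_ofList, h]
      apply PySem.Dict.ext_iff.mpr
      show (PySem.Dict.insert _ x _).items = _
      rw [PySem.Dict.items_insert_of_not_contains _ _ hc]
      simp [pvOfList_append_not_mem h]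

-- ===== VERDICT (by name: the statement is the Claim_ definition above) =====
theorem count_and_indexing_spec : Claim_equal_count_and_indexing := by
  intro sequence _
  unfold Spec_count_and_indexing count_and_indexing count_and_indexing_alt
  have hA := pvLoopA sequence []
  have h0 : pvD [] = PySem.Dict.empty := by
    simp [pvD, PySem.Set.ofList, PySem.Set.empty, PySem.Dict.empty]
  have h1 : pvJ [] = [] := by simp [pvJ, PySem.List.enumerate]
  rw [h0, h1] at hA
  simp only [List.nil_append] at hA
  rw [hA]
  rw [pvDictB (fun x => (PySem.List.count sequence x : Int)) sequence]
  rfl
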